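-- pv_equiv track=rewrite | github.com/waifuisalie/RA4_1 | tests/RA4/test_input_files.py | parsear_tokens
-- ===== SOURCE A (Python) =====
-- def parsear_tokens(linha):
--     """Parseia uma linha em tokens, considerando parênteses"""
--     tokens = []
--     i = 0
--     while i < len(linha):
--         if linha[i].isspace():
--             i += 1
--             continue
--         if linha[i] in '()':
--             tokens.append(linha[i])
--             i += 1
--         elif linha[i].isalnum() or linha[i] in '._-':
--             # Número ou variável
--             start = i
--             while i < len(linha) and (linha[i].isalnum() or linha[i] in '._-'):
--                 i += 1
--             tokens.append(linha[start:i])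
--         else:
--             # Operador
--             tokens.append(linha[i])
--             i += 1
--     return tokens
-- ===== SOURCE B (Python) =====
-- def parsear_tokens(linha):
--     """Parseia uma linha em tokens, considerando parênteses"""
--     tokens = []
--     buf = ''
--     for c in linha:
--         if c.isalnum() or c in '._-':
--             buf += c
--         else:
--             if buf:
--                 tokens.append(buf)
--                 buf = ''
--             if not c.isspace():
--                 tokens.append(c)
--     if buf:
--         tokens.append(buf)
--     return tokens
-- ===== Notes on version B (the rewrite author's own statement) =====
-- stated objective: simpler
-- what changed: Replaced the index-based while loop with an inner word-scanning while loop and slicing by a single flat for-loop over characters maintaining a current-word buffer flushed at each non-word character.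
import Mathlib
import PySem

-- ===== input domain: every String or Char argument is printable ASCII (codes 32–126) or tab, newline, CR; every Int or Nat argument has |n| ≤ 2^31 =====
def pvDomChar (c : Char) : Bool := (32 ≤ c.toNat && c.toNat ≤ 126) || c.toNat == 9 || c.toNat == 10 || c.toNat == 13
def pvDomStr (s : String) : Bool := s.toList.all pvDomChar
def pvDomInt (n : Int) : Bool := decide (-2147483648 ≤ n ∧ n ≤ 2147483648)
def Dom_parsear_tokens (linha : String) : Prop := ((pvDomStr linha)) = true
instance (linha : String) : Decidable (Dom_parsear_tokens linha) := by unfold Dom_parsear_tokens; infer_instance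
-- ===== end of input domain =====

-- B replaces A's index-based outer while loop with an inner word-scanning while loop by a
-- single flat pass maintaining a current-word buffer (objective: simpler). Same O(n) cost.

-- ===== PORT A =====
-- the word-character predicate `linha[i].isalnum() or linha[i] in '._-'`
def pvWordc (c : Char) : Bool := PySem.Chars.isalnum c || c = '.' || c = '_' || c = '-'

-- A's outer while loop over the index becomes structural recursion on the remaining chars;
-- the inner `while … isalnum …` word scan with the slice linha[start:i] becomes takeWhile/dropWhile
def pvGoA : List Char → List String
  | [] => []
  | c :: rest =>
    if PySem.Chars.isspace c then pvGoA rest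
    else if c = '(' || c = ')' then String.ofList [c] :: pvGoA rest
    else if pvWordc c then
      String.ofList (c :: rest.takeWhile pvWordc) :: pvGoA (rest.dropWhile pvWordc)
    else String.ofList [c] :: pvGoA rest
termination_by cs => cs.length
decreasing_by
  · simp
  · simp
  · exact Nat.lt_succ_of_le (List.length_dropWhile_le _ _)
  · simp

def parsear_tokens (linha : String) : List String := pvGoA linha.toList

-- ===== PORT B =====
-- B's flat for-loop: buf is the current word buffer, flushed at each non-word character
def pvGoB : List Char → List Char → List String
  | buf, [] => if buf.isEmpty then [] else [String.ofList buf]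
  | buf, c :: rest =>
    if pvWordc c then pvGoB (buf ++ [c]) rest
    else
      (if buf.isEmpty then [] else [String.ofList buf]) ++
      (if PySem.Chars.isspace c then pvGoB [] rest else String.ofList [c] :: pvGoB [] rest)

def parsear_tokens_alt (linha : String) : List String := pvGoB [] linha.toList

-- ===== PRECONDITION & SPEC =====
def Spec_parsear_tokens (linha : String) (out : List String) : Prop := out = parsear_tokens_alt linha
instance (linha : String) (out : List String) : Decidable (Spec_parsear_tokens linha out) := by unfold Spec_parsear_tokens; infer_instance

-- ===== CLAIM (what is proved, stated in full; the proofs are below) =====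
def Claim_equal_parsear_tokens : Prop := ∀ (linha : String), Dom_parsear_tokens linha → Spec_parsear_tokens linha (parsear_tokens linha)

-- ===== LEMMAS AND PROOFS =====

theorem pvWordc_of_isspace {c : Char} (h : PySem.Chars.isspace c = true) : pvWordc c = false := by
  have e1 : 'A'.toNat = 65 := rfl
  have e2 : 'Z'.toNat = 90 := rfl
  have e3 : 'a'.toNat = 97 := rfl
  have e4 : 'z'.toNat = 122 := rfl
  have e5 : '0'.toNat = 48 := rfl
  have e6 : '9'.toNat = 57 := rfl
  have e7 : '.'.toNat = 46 := rfl
  have e8 : '_'.toNat = 95 := rfl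
  have e9 : '-'.toNat = 45 := rfl
  simp only [PySem.Chars.isspace, PySem.Chars.isalnum, PySem.Chars.isalpha, pvWordc,
    PySem.Chars.isdigit, PySem.Chars.isupper, PySem.Chars.islower, Char.le_def, Char.ext_iff,
    Char.toNat, decide_eq_true_eq, Bool.or_eq_true, Bool.and_eq_true, Bool.or_eq_false_iff,
    Bool.and_eq_false_iff, decide_eq_false_iff_not, UInt32.le_iff_toNat_le, ← UInt32.toNat_inj] at *
  omega

-- with a non-empty buffer, B consumes exactly the word prefix and emits buf ++ word
theorem pvGoB_buf (cs : List Char) (buf : List Char) (h : buf ≠ []) :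
    pvGoB buf cs = String.ofList (buf ++ cs.takeWhile pvWordc) :: pvGoB [] (cs.dropWhile pvWordc) := by
  induction cs generalizing buf with
  | nil => simp [pvGoB, h]
  | cons c rest ih =>
    by_cases hw : pvWordc c = true
    · rw [pvGoB, if_pos hw, ih (buf ++ [c]) (by simp), List.takeWhile_cons_of_pos hw,
        List.dropWhile_cons_of_pos hw]
      simp
    · rw [pvGoB, if_neg hw, List.takeWhile_cons_of_neg (by simpa using hw),
        List.dropWhile_cons_of_neg (by simpa using hw)]
      simp [h, pvGoB, hw]

theorem pvGoA_eq_pvGoB (cs : List Char) : pvGoA cs = pvGoB [] cs := by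
  induction hn : cs.length using Nat.strong_induction_on generalizing cs with
  | _ n ih =>
  cases cs with
  | nil => simp [pvGoA, pvGoB]
  | cons c rest =>
    by_cases hs : PySem.Chars.isspace c = true
    · rw [pvGoA, if_pos hs, pvGoB, if_neg (by simp [pvWordc_of_isspace hs]), if_pos hs]
      simpa using ih rest.length (by simp [← hn]) rest rfl
    · by_cases hp : (c = '(' || c = ')') = true
      · have hw : pvWordc c = false := by
          rcases Bool.or_eq_true_iff.mp hp with h | h <;> simp_all <;> decide
        rw [pvGoA, if_neg hs, if_pos hp, pvGoB, if_neg (by simp [hw]), if_neg hs]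
        simpa using ih rest.length (by simp [← hn]) rest rfl
      · by_cases hw : pvWordc c = true
        · rw [pvGoA, if_neg hs, if_neg hp, if_pos hw, pvGoB, if_pos hw]
          simp only [List.nil_append]
          rw [pvGoB_buf rest [c] (by simp)]
          have := ih (rest.dropWhile pvWordc).length
            (by simp [← hn, Nat.lt_succ_iff, List.length_dropWhile_le])
            (rest.dropWhile pvWordc) rfl
          simp [this]
        · rw [pvGoA, if_neg hs, if_neg hp, if_neg hw, pvGoB, if_neg hw]
          simp [hs]
          exact ih rest.length (by simp [← hn]) rest rfl

-- ===== VERDICT (by name: the statement is the Claim_ definition above) =====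
theorem parsear_tokens_spec : Claim_equal_parsear_tokens := by
  intro linha _
  unfold Spec_parsear_tokens parsear_tokens parsear_tokens_alt
  exact pvGoA_eq_pvGoB _
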